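-- pv_equiv track=rewrite | github.com/tulicsgabriel/Helper-Modules | custom_metrics.py | get_number_of_proteins
-- ===== SOURCE A (Python) =====
-- def get_number_of_proteins(feature_list):
--     """Input a list of features and outputs the number of proteins present
--     in the feature vector
--     """
--     protein_names = [
--         "prot1",
--         "prot2",
--         "prot3",
--         "prot4",
--         "prot5",
--         "prot6",
--         "prot7",
--         "prot6",
--         "prot7",
--         "prot8",
--         "prot9",
--         "prot10",
--     ]
--
--     bool_list = ["False"] * len(protein_names)
--
--     # make features upper in feature list
--     feature_list = [w.upper() for w in feature_list]
--     protein_names = [w.upper() for w in protein_names]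
--
--     for i, protein in enumerate(protein_names):
--         for feature in feature_list:
--             if protein in feature:
--                 bool_list[i] = "True"
--     num_of_proteins = bool_list.count("True")
--     return num_of_proteins
-- ===== SOURCE B (Python) =====
-- def get_number_of_proteins(feature_list):
--     """Input a list of features and outputs the number of proteins present
--     in the feature vector
--     """
--     protein_names = [
--         "prot1",
--         "prot2",
--         "prot3",
--         "prot4",
--         "prot5",
--         "prot6",
--         "prot7",
--         "prot6",
--         "prot7",
--         "prot8",
--         "prot9",
--         "prot10",
--     ]
--     blob = " ".join(w.upper() for w in feature_list)
--     return sum(1 for p in protein_names if p.upper() in blob)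
-- ===== Notes on version B (the rewrite author's own statement) =====
-- stated objective: simpler
-- what changed: B drops A's nested loops and index-updated flag list: it joins the uppercased features once into a single space-separated blob and counts which of the 12 names occur in that one string (safe because no protein name contains a space).
import Mathlib
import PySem

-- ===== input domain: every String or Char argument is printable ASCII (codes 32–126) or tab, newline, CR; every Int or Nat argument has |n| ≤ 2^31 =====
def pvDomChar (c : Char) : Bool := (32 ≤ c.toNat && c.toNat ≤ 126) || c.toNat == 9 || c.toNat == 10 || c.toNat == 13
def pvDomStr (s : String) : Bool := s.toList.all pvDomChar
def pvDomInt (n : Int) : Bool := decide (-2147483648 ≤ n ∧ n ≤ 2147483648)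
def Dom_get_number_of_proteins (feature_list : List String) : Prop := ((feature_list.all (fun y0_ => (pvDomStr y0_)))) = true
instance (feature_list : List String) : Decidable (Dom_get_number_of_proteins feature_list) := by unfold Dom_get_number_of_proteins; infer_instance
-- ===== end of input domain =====

-- B replaces A's nested loops (each name tested against every feature) by one space-joined
-- uppercase blob searched once per name; simpler, same observable result.

-- ===== PORT A =====
-- the module's fixed 12-name list (with its duplicated "prot6"/"prot7"), shared data of both ports
def pvProteinNames : List String :=
  ["prot1", "prot2", "prot3", "prot4", "prot5", "prot6",
   "prot7", "prot6", "prot7", "prot8", "prot9", "prot10"]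

def get_number_of_proteins (feature_list : List String) : Int :=
  let protein_names := pvProteinNames
  let bool_list := List.replicate protein_names.length "False"
  let feature_list := feature_list.map (fun w => PySem.Str.upper w)
  let protein_names := protein_names.map (fun w => PySem.Str.upper w)
  let bool_list :=
    (PySem.List.enumerate protein_names 0).foldl
      (fun bl ip =>
        feature_list.foldl
          (fun bl feature =>
            if PySem.Str.isIn ip.2 feature then bl.set ip.1.toNat "True" else bl)
          bl)
      bool_list
  ((bool_list.count "True" : Nat) : Int)

-- ===== PORT B =====
def get_number_of_proteins_alt (feature_list : List String) : Int :=
  let blob := PySem.Str.join " " (feature_list.map (fun w => PySem.Str.upper w))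
  (((pvProteinNames.filter (fun p => PySem.Str.isIn (PySem.Str.upper p) blob)).length : Nat) : Int)

-- ===== PRECONDITION & SPEC =====
def Spec_get_number_of_proteins (feature_list : List String) (out : Int) : Prop := out = get_number_of_proteins_alt feature_list
instance (feature_list : List String) (out : Int) : Decidable (Spec_get_number_of_proteins feature_list out) := by unfold Spec_get_number_of_proteins; infer_instance

-- ===== CLAIM (what is proved, stated in full; the proofs are below) =====
def Claim_equal_get_number_of_proteins : Prop := ∀ (feature_list : List String), Dom_get_number_of_proteins feature_list → Spec_get_number_of_proteins feature_list (get_number_of_proteins feature_list)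

-- ===== LEMMAS AND PROOFS =====

-- a prefix that does not contain c stops before an occurrence of c
theorem pv_prefix_no_sep {c : Char} {ys : List Char} :
    ∀ (sub xs : List Char), c ∉ sub → sub <+: xs ++ c :: ys → sub <+: xs := by
  intro sub
  induction sub with
  | nil => intro xs _ _; exact List.nil_prefix
  | cons a sub ih =>
    intro xs hc hp
    cases xs with
    | nil =>
      rcases List.cons_prefix_cons.mp hp with ⟨rfl, _⟩
      exact absurd (List.mem_cons_self) hc
    | cons x xs =>
      rcases List.cons_prefix_cons.mp hp with ⟨rfl, htl⟩
      exact List.cons_prefix_cons.mpr ⟨rfl, ih xs (fun h => hc (List.mem_cons_of_mem _ h)) htl⟩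

-- an infix avoiding the separator lies wholly on one side of it
theorem pv_infix_no_sep {c : Char} {sub ys : List Char} :
    ∀ (xs : List Char), c ∉ sub → sub <:+: xs ++ c :: ys → sub <:+: xs ∨ sub <:+: ys := by
  intro xs
  induction xs with
  | nil =>
    intro hc h
    rcases List.infix_cons_iff.mp h with hp | hi
    · cases sub with
      | nil => exact Or.inl (List.nil_infix)
      | cons a sub =>
        rcases List.cons_prefix_cons.mp hp with ⟨rfl, _⟩
        exact absurd (List.mem_cons_self) hc
    · exact Or.inr hi
  | cons x xs ih =>
    intro hc h
    rcases List.infix_cons_iff.mp h with hp | hi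
    · exact Or.inl ((pv_prefix_no_sep sub (x :: xs) hc hp).isInfix)
    · rcases ih hc hi with h1 | h2
      · exact Or.inl (h1.trans ⟨[x], [], by simp⟩)
      · exact Or.inr h2

-- a separator-free nonempty pattern occurs in ' '.join(parts) iff it occurs in one part
theorem pv_isIn_join_space (sub : List Char) (h1 : sub ≠ []) (h2 : ' ' ∉ sub) :
    ∀ (parts : List (List Char)),
      PySem.Chars.isIn sub (PySem.Chars.join [' '] parts)
        = parts.any (fun p => PySem.Chars.isIn sub p) := by
  intro parts
  induction parts with
  | nil =>
    simp only [PySem.Chars.join_nil, List.any_nil]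
    rw [PySem.Chars.isIn_eq_false_iff]
    intro h
    exact h1 (List.eq_nil_of_infix_nil h)
  | cons p rest ih =>
    cases rest with
    | nil =>
      simp [PySem.Chars.join_singleton]
    | cons q rest' =>
      rw [PySem.Chars.join_cons_cons, List.any_cons, ← ih]
      by_cases hj : sub <:+: p ++ [' '] ++ PySem.Chars.join [' '] (q :: rest')
      · rw [(PySem.Chars.isIn_iff_infix _ _).mpr hj]
        rcases pv_infix_no_sep (sub := sub) p h2 (by simpa using hj) with h | h
        · rw [(PySem.Chars.isIn_iff_infix _ _).mpr h]; simp
        · rw [(PySem.Chars.isIn_iff_infix _ _).mpr h]; simp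
      · rw [(PySem.Chars.isIn_eq_false_iff _ _).mpr hj]
        have hp : PySem.Chars.isIn sub p = false := by
          rw [PySem.Chars.isIn_eq_false_iff]
          intro h
          exact hj (h.trans ⟨[], [' '] ++ PySem.Chars.join [' '] (q :: rest'), by simp⟩)
        have hq : PySem.Chars.isIn sub (PySem.Chars.join [' '] (q :: rest')) = false := by
          rw [PySem.Chars.isIn_eq_false_iff]
          intro h
          exact hj (h.trans ⟨p ++ [' '], [], by simp⟩)
        simp [hp, hq]

-- String-level: membership in the blob equals membership in some joined string
theorem pv_any_isIn_eq_isIn_join (p : String) (h1 : p.toList ≠ []) (h2 : ' ' ∉ p.toList)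
    (xs : List String) :
    PySem.Str.isIn p (PySem.Str.join " " xs) = xs.any (fun f => PySem.Str.isIn p f) := by
  have hsep : (" " : String).toList = [' '] := rfl
  rw [PySem.Str.isIn_eq, PySem.Str.toList_join, hsep, pv_isIn_join_space p.toList h1 h2]
  rw [List.any_map]
  rfl

-- A's inner loop either sets slot i or leaves the list unchanged
theorem pv_inner (p : String) (i : Nat) :
    ∀ (fl bl : List String),
      fl.foldl (fun bl f => if PySem.Str.isIn p f then bl.set i "True" else bl) bl
        = if fl.any (fun f => PySem.Str.isIn p f) then bl.set i "True" else bl := by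
  intro fl
  induction fl with
  | nil => intro bl; simp
  | cons f rest ih =>
    intro bl
    rw [List.foldl_cons, List.any_cons]
    by_cases h : PySem.Str.isIn p f = true
    · rw [if_pos h, ih, h]
      cases hr : rest.any (fun f => PySem.Str.isIn p f) <;>
        simp [List.set_set]
    · rw [if_neg h, ih]
      have h' : PySem.Str.isIn p f = false := by simpa using h
      rw [h']
      simp

-- A's outer loop turns the "False" slots into per-name verdicts
theorem pv_outer (c : String → Bool) :
    ∀ (names : List String) (k : Nat) (pre : List String), pre.length = k →
      (PySem.List.enumerate names (k : Int)).foldl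
          (fun bl ip => if c ip.2 then bl.set ip.1.toNat "True" else bl)
          (pre ++ List.replicate names.length "False")
        = pre ++ names.map (fun p => if c p then "True" else "False") := by
  intro names
  induction names with
  | nil => intro k pre _; simp [PySem.List.enumerate_nil]
  | cons n rest ih =>
    intro k pre hk
    rw [PySem.List.enumerate_cons]
    simp only [List.foldl_cons, List.length_cons, List.replicate_succ]
    have hset : ∀ v : String,
        (pre ++ "False" :: List.replicate rest.length "False").set (Int.toNat (k : Int)) v
          = (pre ++ [v]) ++ List.replicate rest.length "False" := by
      intro v; rw [Int.toNat_natCast, ← hk]; simp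
    have hcast : ((k : Int) + 1) = ((k + 1 : Nat) : Int) := by push_cast; ring
    by_cases h : c n = true
    · rw [if_pos h, hset "True", hcast, ih (k + 1) (pre ++ ["True"]) (by simp [hk])]
      simp [h]
    · rw [if_neg h,
        show pre ++ "False" :: List.replicate rest.length "False"
            = (pre ++ ["False"]) ++ List.replicate rest.length "False" by simp,
        hcast, ih (k + 1) (pre ++ ["False"]) (by simp [hk])]
      simp [h]

-- counting "True" verdicts is counting the names whose test holds
theorem pv_count (c : String → Bool) (names : List String) :
    (names.map (fun p => if c p then "True" else "False")).count "True" = names.countP c := by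
  rw [List.count_eq_countP, List.countP_map]
  refine List.countP_congr ?_
  intro a _
  cases h : c a <;> simp [h]

theorem get_number_of_proteins_eq (feature_list : List String) :
    get_number_of_proteins feature_list = get_number_of_proteins_alt feature_list := by
  unfold get_number_of_proteins get_number_of_proteins_alt
  dsimp only
  set fl := feature_list.map (fun w => PySem.Str.upper w) with hfl
  set c : String → Bool := fun p => fl.any (fun f => PySem.Str.isIn p f) with hc
  have hinner : (fun (bl : List String) (ip : Int × String) =>
      fl.foldl (fun bl feature =>
        if PySem.Str.isIn ip.2 feature then bl.set ip.1.toNat "True" else bl) bl)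
      = (fun bl ip => if c ip.2 then bl.set ip.1.toNat "True" else bl) := by
    funext bl ip; exact pv_inner ip.2 ip.1.toNat fl bl
  rw [hinner]
  have hrep : List.replicate pvProteinNames.length "False"
      = ([] : List String) ++ List.replicate (pvProteinNames.map (fun w => PySem.Str.upper w)).length "False" := by
    simp
  rw [hrep, show (0 : Int) = ((0 : Nat) : Int) from rfl,
    pv_outer c (pvProteinNames.map (fun w => PySem.Str.upper w)) 0 [] rfl,
    List.nil_append, pv_count, List.countP_map,
    show (pvProteinNames.filter (fun p => PySem.Str.isIn (PySem.Str.upper p)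
        (PySem.Str.join " " fl))).length
      = pvProteinNames.countP (fun p => PySem.Str.isIn (PySem.Str.upper p) (PySem.Str.join " " fl)) from
      (List.countP_eq_length_filter).symm]
  congr 1
  refine List.countP_congr ?_
  intro p hp
  have hmem : p = "prot1" ∨ p = "prot2" ∨ p = "prot3" ∨ p = "prot4" ∨ p = "prot5" ∨
      p = "prot6" ∨ p = "prot7" ∨ p = "prot8" ∨ p = "prot9" ∨ p = "prot10" := by
    simp only [pvProteinNames, List.mem_cons, List.not_mem_nil, or_false] at hp
    tauto
  have h1 : (PySem.Str.upper p).toList ≠ [] := by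
    rcases hmem with rfl | rfl | rfl | rfl | rfl | rfl | rfl | rfl | rfl | rfl <;> decide
  have h2 : ' ' ∉ (PySem.Str.upper p).toList := by
    rcases hmem with rfl | rfl | rfl | rfl | rfl | rfl | rfl | rfl | rfl | rfl <;> decide
  rw [Function.comp_apply, pv_any_isIn_eq_isIn_join (PySem.Str.upper p) h1 h2 fl]

-- ===== VERDICT (by name: the statement is the Claim_ definition above) =====
theorem get_number_of_proteins_spec : Claim_equal_get_number_of_proteins := by
  intro feature_list _
  unfold Spec_get_number_of_proteins
  exact get_number_of_proteins_eq feature_list
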